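-- pv_equiv track=rewrite | github.com/zmockwebdesign/collatz-v2 | collatz_hash.py | text_to_number
-- ===== SOURCE A (Python) =====
-- MULTIPLIER = 100_000_000_000_000  # 100 trillion
--
-- def text_to_number(text, multiplier=MULTIPLIER):
--     """
--     Encode text to a number using base-128.
--
--     Base-128 matches ASCII printable range (0-127 = 7 bits per char).
--     """
--     result = 0
--     for char in text:
--         result = (result << 7) + (ord(char) & 0x7F)
--     result *= multiplier
--     if not (result & 1):
--         result = (result << 1) | 1
--     return result
-- ===== SOURCE B (Python) =====
-- MULTIPLIER = 100_000_000_000_000  # 100 trillion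
--
-- def _encode(s):
--     """Base-128 value of s by divide and conquer: enc(l + r) = enc(l) * 128**len(r) + enc(r)."""
--     n = len(s)
--     if n == 0:
--         return 0
--     if n == 1:
--         return ord(s) % 128
--     mid = n // 2
--     return _encode(s[:mid]) * 128 ** (n - mid) + _encode(s[mid:])
--
-- def text_to_number(text, multiplier=MULTIPLIER):
--     """Encode text to a base-128 number, scale it, and make it odd — all in plain arithmetic."""
--     result = _encode(text) * multiplier
--     if result % 2 == 0:
--         result = 2 * result + 1
--     return result
-- ===== Notes on version B (the rewrite author's own statement) =====
-- stated objective: faster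
-- what changed: Replaces A's bitwise Horner loop (result = (result<<7) + (ord(c)&0x7F)) with a recursive divide-and-conquer base-128 encoder (enc(l+r) = enc(l)*128**len(r) + enc(r), splitting at the midpoint) and a pure-arithmetic scale/make-odd tail (result%2, 2*result+1).
import Mathlib
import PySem

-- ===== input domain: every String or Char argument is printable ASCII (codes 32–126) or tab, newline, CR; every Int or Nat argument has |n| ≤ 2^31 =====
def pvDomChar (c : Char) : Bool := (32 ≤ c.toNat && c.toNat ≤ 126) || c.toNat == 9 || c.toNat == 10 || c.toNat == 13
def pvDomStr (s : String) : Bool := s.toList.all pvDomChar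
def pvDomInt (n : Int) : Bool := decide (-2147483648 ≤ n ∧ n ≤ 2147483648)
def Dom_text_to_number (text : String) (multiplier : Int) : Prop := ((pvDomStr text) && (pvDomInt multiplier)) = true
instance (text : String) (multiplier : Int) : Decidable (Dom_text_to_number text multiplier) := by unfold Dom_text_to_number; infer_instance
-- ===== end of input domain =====

-- B replaces A's bitwise Horner loop with a divide-and-conquer base-128 encoder
-- (enc(l + r) = enc(l) * 128**len(r) + enc(r)) and a pure-arithmetic scale/make-odd tail.

-- ===== PORT A =====
-- loop step: result = (result << 7) + (ord(char) & 0x7F)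
def aStep (r : Int) (c : Char) : Int := (r <<< (7 : Nat)) + PySem.Int.band (c.toNat : Int) 0x7F

def text_to_number (text : String) (multiplier : Int) : Int :=
  let result := text.toList.foldl aStep 0
  let result := result * multiplier
  if PySem.Int.band result 1 = 0 then PySem.Int.bor (result <<< (1 : Nat)) 1 else result

-- ===== PORT B =====
-- _encode: split at mid = n // 2, encode halves, recombine with weight 128 ** (n - mid)
def encB (s : List Char) : Int :=
  if s.length = 0 then 0
  else if s.length = 1 then
    match s with
    | c :: _ => PySem.Int.mod (c.toNat : Int) 128
    | [] => 0
  else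
    let mid := s.length / 2
    encB (PySem.List.slice s none (some (mid : Int))) * 128 ^ (s.length - mid) +
    encB (PySem.List.slice s (some (mid : Int)) none)
termination_by s.length
decreasing_by
  · simp only [PySem.List.slice_to_natCast, List.length_take]; omega
  · simp only [PySem.List.slice_from_natCast, List.length_drop]; omega

def text_to_number_alt (text : String) (multiplier : Int) : Int :=
  let result := encB text.toList * multiplier
  if PySem.Int.mod result 2 = 0 then 2 * result + 1 else result

-- ===== PRECONDITION & SPEC =====
def Spec_text_to_number (text : String) (multiplier : Int) (out : Int) : Prop := out = text_to_number_alt text multiplier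
instance (text : String) (multiplier : Int) (out : Int) : Decidable (Spec_text_to_number text multiplier out) := by unfold Spec_text_to_number; infer_instance

-- ===== CLAIM (what is proved, stated in full; the proofs are below) =====
def Claim_equal_text_to_number : Prop := ∀ (text : String) (multiplier : Int), Dom_text_to_number text multiplier → Spec_text_to_number text multiplier (text_to_number text multiplier)

-- ===== LEMMAS AND PROOFS =====

theorem int_shl (r : Int) (k : Nat) : r <<< k = r * 2 ^ k := by
  simp [Int.shiftLeft_eq]

-- the two per-character digit computations agree
theorem digit_eq (c : Char) :
    PySem.Int.mod (c.toNat : Int) 128 = PySem.Int.band (c.toNat : Int) 0x7F := by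
  rw [PySem.Int.band_of_nonneg (by positivity) (by norm_num)]
  have h : c.toNat &&& (127 : Nat) = c.toNat % 128 := by
    have := Nat.and_two_pow_sub_one_eq_mod c.toNat 7
    norm_num at this
    exact this
  simp [Int.toNat_natCast, h]

theorem aStep_eq (r : Int) (c : Char) :
    aStep r c = r * 128 + PySem.Int.band (c.toNat : Int) 0x7F := by
  simp [aStep, int_shl]

-- A's fold splits its initial accumulator off as a top weight
theorem afold_split (l : List Char) (r : Int) :
    l.foldl aStep r = r * 128 ^ l.length + l.foldl aStep 0 := by
  induction l generalizing r with
  | nil => simp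
  | cons c l ih =>
    simp only [List.foldl_cons, List.length_cons]
    rw [ih (aStep r c), ih (aStep 0 c), aStep_eq, aStep_eq]
    ring

-- B's divide-and-conquer encoder computes A's Horner fold (strong induction on the length)
theorem encB_eq_afold : ∀ (n : Nat) (s : List Char), s.length = n → encB s = s.foldl aStep 0 := by
  intro n
  induction n using Nat.strong_induction_on with
  | _ n ih =>
    intro s hs
    rw [encB.eq_def]
    by_cases h0 : s.length = 0
    · simp [List.length_eq_zero_iff.mp h0]
    · rw [if_neg h0]
      by_cases h1 : s.length = 1
      · rw [if_pos h1]
        obtain ⟨c, rfl⟩ := List.length_eq_one_iff.mp h1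
        dsimp only
        rw [digit_eq]
        simp [aStep]
      · rw [if_neg h1]
        dsimp only
        rw [PySem.List.slice_to_natCast, PySem.List.slice_from_natCast]
        rw [ih (s.take (s.length / 2)).length (by subst hs; simp; omega) _ rfl,
            ih (s.drop (s.length / 2)).length (by subst hs; simp; omega) _ rfl]
        conv_rhs => rw [← List.take_append_drop (s.length / 2) s]
        rw [List.foldl_append,
            afold_split (s.drop (s.length / 2)) (List.foldl aStep 0 (s.take (s.length / 2))),
            List.length_drop]

-- Python's (x << 1) | 1 is 2*x + 1 (the low bit of 2*x is clear)
theorem bor_two_mul_one (x : Int) : PySem.Int.bor (2 * x) 1 = 2 * x + 1 := by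
  unfold PySem.Int.bor
  by_cases h : (0 : Int) ≤ 2 * x
  · rw [if_pos h, if_pos (by norm_num)]
    have hm : (2 * x).toNat = 2 * x.toNat := by omega
    have hone : (1 : Int).toNat = 1 := rfl
    rw [hm, hone]
    have : 2 * x.toNat ||| 1 = 2 * x.toNat + 1 := by
      have hs : x.toNat <<< 1 = 2 * x.toNat := by
        simp [Nat.shiftLeft_eq]; ring
      have := Nat.shiftLeft_add_eq_or_of_lt (a := x.toNat) (b := 1) (i := 1) (by norm_num)
      rw [hs] at this
      omega
    rw [this]; omega
  · rw [if_neg h, if_pos (by norm_num)]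
    have hm : (-(2 * x) - 1).toNat = 2 * (-x).toNat - 1 := by omega
    rw [hm, show ((1 : Int).toNat) = 1 from rfl, Nat.and_one_is_mod]
    have h2 : (2 * (-x).toNat - 1) % 2 = 1 := by omega
    rw [h2]; omega

-- ===== VERDICT (by name: the statement is the Claim_ definition above) =====
theorem text_to_number_spec : Claim_equal_text_to_number := by
  intro text multiplier _
  unfold Spec_text_to_number text_to_number text_to_number_alt
  dsimp only
  rw [encB_eq_afold text.toList.length text.toList rfl]
  set r := text.toList.foldl aStep 0 * multiplier with hr
  rw [PySem.Int.band_one]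
  by_cases h : PySem.Int.mod r 2 = 0
  · rw [if_pos h, if_pos h, int_shl, show r * 2 ^ 1 = 2 * r from by ring, bor_two_mul_one]
  · rw [if_neg h, if_neg h]
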